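-- pv_equiv track=rewrite | github.com/jaeha-choi/CodeSnippets | codesignal/level_7.py | stringsRearrangement
-- ===== SOURCE A (Python) =====
-- def visit(curr, d, done):
--     mx = len(done)
--     for elem in d[curr]:
--         if elem not in done:
--             done.append(elem)
--             curr_mx = visit(elem, d, done)
--             done.remove(elem)
--             if mx < curr_mx:
--                 mx = curr_mx
--     return mx
--
-- def stringsRearrangement(inputArray):
--     d = {}
--     for idx in range(len(inputArray)):
--         d[idx] = []
--         for jdx in range(len(inputArray)):
--             if idx != jdx:
--                 count = 0
--                 for i, j in zip(inputArray[idx], inputArray[jdx]):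
--                     if i != j:
--                         count += 1
--                 if count == 1:
--                     d[idx].append(jdx)
--     lengths = [len(val) for val in d.values()]
--     start_val = list(d.keys()).index(lengths.index(min(lengths)))
--
--     return visit(start_val, d, [start_val]) == len(inputArray)
-- ===== SOURCE B (Python) =====
-- def stringsRearrangement(inputArray):
--     n = len(inputArray)
--
--     def diff_one(s, t):
--         return sum(1 for a, b in zip(s, t) if a != b) == 1
--
--     adj = [[j for j in range(n) if j != i and diff_one(inputArray[i], inputArray[j])]
--            for i in range(n)]
--     degs = [len(a) for a in adj]
--     start = degs.index(min(degs))  # ValueError on empty input, as in A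
--
--     # breadth-first expansion, level by level: frontier holds every simple path
--     # from start of the current length; stop when no path can be extended
--     frontier = [[start]]
--     length = 1
--     while True:
--         nxt = [path + [j] for path in frontier for j in adj[path[-1]] if j not in path]
--         if not nxt:
--             break
--         frontier = nxt
--         length += 1
--     return length == n
-- ===== Notes on version B (the rewrite author's own statement) =====
-- stated objective: alternative
-- what changed: A's recursive backtracking DFS (mutating a shared path list and tracking a running maximum) is replaced by an iterative level-synchronous BFS: a frontier of all simple paths of the current length is expanded level by level until no path extends, and the number of levels is compared with n; the adjacency build becomes list comprehensions over a list of lists instead of nested index loops into a dict.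
import Mathlib
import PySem

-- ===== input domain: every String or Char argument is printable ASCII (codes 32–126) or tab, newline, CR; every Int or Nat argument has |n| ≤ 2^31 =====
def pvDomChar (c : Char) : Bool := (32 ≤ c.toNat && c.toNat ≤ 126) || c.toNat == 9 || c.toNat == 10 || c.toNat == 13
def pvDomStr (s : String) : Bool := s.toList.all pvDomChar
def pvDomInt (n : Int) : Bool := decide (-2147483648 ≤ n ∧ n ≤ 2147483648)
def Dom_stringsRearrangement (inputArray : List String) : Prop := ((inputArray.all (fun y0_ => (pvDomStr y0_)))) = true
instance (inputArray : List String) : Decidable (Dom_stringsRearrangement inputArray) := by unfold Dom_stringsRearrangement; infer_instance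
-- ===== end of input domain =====

-- B replaces A's recursive backtracking DFS for the longest simple path from the start
-- vertex by an iterative level-synchronous BFS over simple paths, counting levels
-- (objective: alternative — a structurally different algorithm, not claimed faster).

-- ===== PORT A =====

-- count of differing characters over zip(inputArray[idx], inputArray[jdx])
def pvCountDiff (s t : String) : Int :=
  (s.toList.zip t.toList).foldl (fun c p => if p.1 ≠ p.2 then c + 1 else c) 0

-- the inner 'for jdx in range(len(inputArray))' loop building d[idx]
def pvNeighA (inputArray : List String) (n idx : Int) : List Int :=
  (PySem.List.pyRange 0 n 1).foldl (fun acc jdx =>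
    if idx ≠ jdx then
      if pvCountDiff (PySem.List.pyGetD inputArray idx "")
                     (PySem.List.pyGetD inputArray jdx "") = 1
      then acc ++ [jdx] else acc
    else acc) []

-- visit(curr, d, done): done.append(elem) … done.remove(elem) becomes passing done ++ [elem]
-- to the recursive call; fuel bounds the recursion depth (never exhausted on actual runs:
-- the path done is duplicate-free inside 0..n-1, proved below). d[curr] is pyGetD (exact:
-- curr is always a key).
def pvVisitA (d : PySem.Dict Int (List Int)) : Nat → Int → List Int → Int
  | 0, _, done => (done.length : Int)
  | fuel+1, curr, done =>
    (d.getD curr []).foldl (fun mx elem =>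
      if elem ∈ done then mx
      else
        let curr_mx := pvVisitA d fuel elem (done ++ [elem])
        if mx < curr_mx then curr_mx else mx) (done.length : Int)

def stringsRearrangement (inputArray : List String) : Bool :=
  let n : Int := (inputArray.length : Int)
  let d : PySem.Dict Int (List Int) :=
    (PySem.List.pyRange 0 n 1).foldl
      (fun d idx => d.insert idx (pvNeighA inputArray n idx)) PySem.Dict.empty
  let lengths : List Int := d.values.map (fun val => (val.length : Int))
  match PySem.List.min? lengths (fun x => x) with
  | none => false            -- Python raises ValueError (empty input); excluded by Pre_
  | some m =>
    match PySem.List.index? lengths m with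
    | none => false          -- unreachable: min is a member
    | some i =>
      match PySem.List.index? d.keys ((i : Nat) : Int) with
      | none => false        -- unreachable here: i < n and keys = 0..n-1
      | some start_val =>
        pvVisitA d inputArray.length ((start_val : Nat) : Int)
          [((start_val : Nat) : Int)] == n

-- ===== PORT B =====

-- diff_one(s, t)
def pvDiffOne (s t : String) : Bool :=
  ((s.toList.zip t.toList).countP (fun p => p.1 != p.2) : Int) == 1

-- the comprehension building adj[i]
def pvAdjB (inputArray : List String) (n i : Int) : List Int :=
  (PySem.List.pyRange 0 n 1).filter (fun j =>
    j != i && pvDiffOne (PySem.List.pyGetD inputArray i "")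
                        (PySem.List.pyGetD inputArray j ""))

-- the while-loop: nxt is the comprehension, break when it is empty; fuel bounds the number
-- of iterations (never exhausted on actual runs: a path is duplicate-free inside 0..n-1 so
-- there are at most n levels, proved below)
def pvBfs (adj : List (List Int)) : Nat → List (List Int) → Int → Int
  | 0, _, length => length
  | fuel+1, frontier, length =>
    let nxt := frontier.flatMap (fun path =>
      ((PySem.List.pyGetD adj (PySem.List.pyGetD path (-1) 0) []).filter
        (fun j => decide (j ∉ path))).map (fun j => path ++ [j]))
    if nxt.isEmpty then length else pvBfs adj fuel nxt (length + 1)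

def stringsRearrangement_alt (inputArray : List String) : Bool :=
  let n : Int := (inputArray.length : Int)
  let adj : List (List Int) :=
    (PySem.List.pyRange 0 n 1).map (fun i => pvAdjB inputArray n i)
  let degs : List Int := adj.map (fun a => (a.length : Int))
  match PySem.List.min? degs (fun x => x) with
  | none => false            -- Python raises ValueError (empty input); excluded by Pre_
  | some m =>
    match PySem.List.index? degs m with
    | none => false          -- unreachable: min is a member
    | some start =>
      pvBfs adj inputArray.length [[((start : Nat) : Int)]] 1 == n

-- ===== PRECONDITION & SPEC =====
-- Pre_ excludes only the empty list, on which both A and B raise ValueError (min() of an empty sequence).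
def Pre_stringsRearrangement (inputArray : List String) : Prop := inputArray ≠ []
instance (inputArray : List String) : Decidable (Pre_stringsRearrangement inputArray) := by
  unfold Pre_stringsRearrangement; infer_instance
def pvWitness_stringsRearrangement : List String := ["aa", "ab"]

def Spec_stringsRearrangement (inputArray : List String) (out : Bool) : Prop := out = stringsRearrangement_alt inputArray
instance (inputArray : List String) (out : Bool) : Decidable (Spec_stringsRearrangement inputArray out) := by unfold Spec_stringsRearrangement; infer_instance

-- ===== CLAIM (what is proved, stated in full; the proofs are below) =====
def Claim_equal_stringsRearrangement : Prop := ∀ (inputArray : List String), Dom_stringsRearrangement inputArray → Pre_stringsRearrangement inputArray → Spec_stringsRearrangement inputArray (stringsRearrangement inputArray)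

-- ===== LEMMAS AND PROOFS =====

lemma pv_countDiff_eq (s t : String) :
    pvCountDiff s t = ((s.toList.zip t.toList).countP (fun p => p.1 != p.2) : Int) := by
  unfold pvCountDiff
  rw [PySem.List.foldl_ite_add_one]
  simp only [zero_add, Nat.cast_inj]
  apply List.countP_congr
  intro x _
  simp [bne]

lemma pv_neigh_eq (arr : List String) (n i : Int) : pvNeighA arr n i = pvAdjB arr n i := by
  unfold pvNeighA pvAdjB
  rw [PySem.List.foldl_congr_mem' (g := fun acc j =>
    if j != i && pvDiffOne (PySem.List.pyGetD arr i "") (PySem.List.pyGetD arr j "")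
    then acc ++ [j] else acc)]
  · rw [PySem.List.foldl_append_if_eq_filter]
    simp
  · intro j _ acc
    by_cases h1 : i = j
    · simp [h1]
    · have h2 : (j != i) = true := by simp [bne]; exact fun h => h1 h.symm
      by_cases h3 : pvCountDiff (PySem.List.pyGetD arr i "") (PySem.List.pyGetD arr j "") = 1
      · have : pvDiffOne (PySem.List.pyGetD arr i "") (PySem.List.pyGetD arr j "") = true := by
          simp [pvDiffOne, ← pv_countDiff_eq, h3]
        simp [h1, h2, h3, this]
      · have : pvDiffOne (PySem.List.pyGetD arr i "") (PySem.List.pyGetD arr j "") = false := by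
          simp [pvDiffOne, ← pv_countDiff_eq]; exact h3
        simp [h1, h2, h3, this]

lemma pv_items (arr : List String) (n : Int) :
    ((PySem.List.pyRange 0 n 1).foldl
      (fun d idx => d.insert idx (pvNeighA arr n idx)) PySem.Dict.empty).items
    = (PySem.List.pyRange 0 n 1).map (fun idx => (idx, pvNeighA arr n idx)) := by
  rw [PySem.Dict.items_foldl_insert_fresh (k := fun a => a) (v := fun a => pvNeighA arr n a)]
  · simp [PySem.Dict.empty]
  · intro a _; exact PySem.Dict.contains_empty a
  · simpa using PySem.List.nodup_pyRange_one 0 n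

lemma pv_keys (arr : List String) (n : Int) :
    ((PySem.List.pyRange 0 n 1).foldl
      (fun d idx => d.insert idx (pvNeighA arr n idx)) PySem.Dict.empty).keys
    = PySem.List.pyRange 0 n 1 := by
  simp [PySem.Dict.keys, pv_items]
  exact List.map_id _

lemma pv_values (arr : List String) (n : Int) :
    ((PySem.List.pyRange 0 n 1).foldl
      (fun d idx => d.insert idx (pvNeighA arr n idx)) PySem.Dict.empty).values
    = (PySem.List.pyRange 0 n 1).map (fun idx => pvNeighA arr n idx) := by
  simp [PySem.Dict.values, pv_items]

lemma pv_getD (arr : List String) (n v : Int) (h0 : 0 ≤ v) (h1 : v < n) :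
    ((PySem.List.pyRange 0 n 1).foldl
      (fun d idx => d.insert idx (pvNeighA arr n idx)) PySem.Dict.empty).getD v []
    = pvNeighA arr n v := by
  apply PySem.Dict.getD_of_mem_items
  · rw [pv_items]
    exact List.mem_map_of_mem (PySem.List.mem_pyRange_one.mpr ⟨h0, h1⟩)
  · rw [pv_keys]; exact PySem.List.nodup_pyRange_one 0 n

lemma pv_index_pyRange (n : Int) (i : Nat) (h : (i : Int) < n) :
    PySem.List.index? (PySem.List.pyRange 0 n 1) ((i : Nat) : Int) = some i := by
  rw [PySem.List.index?_eq_some_iff]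
  refine ⟨PySem.List.pyRange 0 i 1, PySem.List.pyRange ((i:Int)+1) n 1, ?_, ?_, ?_⟩
  · rw [PySem.List.pyRange_one_append 0 (i:Int) n (by positivity) (le_of_lt h),
        PySem.List.pyRange_one_cons h]
  · simp [PySem.List.length_pyRange_one]
  · intro hmem
    have := (PySem.List.mem_pyRange_one.mp hmem).2
    omega

lemma pv_foldl_le (step : Int → Int → Int) (hmono : ∀ a e, a ≤ step a e) :
    ∀ (l : List Int) (init : Int), init ≤ l.foldl step init := by
  intro l
  induction l with
  | nil => intro init; exact le_refl _
  | cons e l ih => intro init; exact le_trans (hmono init e) (ih (step init e))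

lemma pv_foldl_reach (step : Int → Int → Int) (hmono : ∀ a e, a ≤ step a e)
    (u T : Int) (hu : ∀ a, T ≤ step a u) :
    ∀ (l : List Int) (init : Int), u ∈ l → T ≤ l.foldl step init := by
  intro l
  induction l with
  | nil => intro init h; simp at h
  | cons e l ih =>
    intro init h
    rcases List.mem_cons.mp h with rfl | h
    · exact le_trans (hu init) (pv_foldl_le step hmono l _)
    · exact ih _ h

lemma pv_visit_ge_len (d : PySem.Dict Int (List Int)) :
    ∀ (fuel : Nat) (curr : Int) (done : List Int),
      ((done.length : Int)) ≤ pvVisitA d fuel curr done := by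
  intro fuel curr done
  cases fuel with
  | zero => exact le_refl _
  | succ fuel =>
    show ((done.length : Int)) ≤ (d.getD curr []).foldl _ _
    apply pv_foldl_le
    intro a e
    dsimp only
    split_ifs <;> omega

lemma pv_visit_ge (d : PySem.Dict Int (List Int)) (n : Int) (g : Int → List Int)
    (hd : ∀ v, 0 ≤ v → v < n → d.getD v [] = g v)
    (hg : ∀ v u, u ∈ g v → 0 ≤ u ∧ u < n) :
    ∀ (fuel : Nat) (p : List Int) (curr : Int) (done : List Int),
      0 ≤ curr → curr < n →
      List.IsChain (fun a b => b ∈ g a) (curr :: p) → p.Nodup →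
      (∀ v ∈ p, v ∉ done) → p.length ≤ fuel →
      ((done.length : Int)) + p.length ≤ pvVisitA d fuel curr done := by
  intro fuel
  induction fuel with
  | zero =>
    intro p curr done _ _ _ _ _ hlen
    have : p = [] := List.length_eq_zero_iff.mp (Nat.le_zero.mp hlen)
    subst this
    simpa using pv_visit_ge_len d 0 curr done
  | succ fuel ih =>
    intro p curr done hc0 hc1 hchain hnd hdisj hlen
    cases p with
    | nil => simpa using pv_visit_ge_len d (fuel+1) curr done
    | cons u p' =>
      obtain ⟨hu, hchain'⟩ := List.isChain_cons_cons.mp hchain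
      show _ ≤ (d.getD curr []).foldl _ _
      rw [hd curr hc0 hc1]
      obtain ⟨hu0, hu1⟩ := hg curr u hu
      have hmono : ∀ (a e : Int),
          a ≤ (fun mx elem => if elem ∈ done then mx
            else
              let curr_mx := pvVisitA d fuel elem (done ++ [elem])
              if mx < curr_mx then curr_mx else mx) a e := by
        intro a e; dsimp only; split_ifs <;> omega
      apply pv_foldl_reach _ hmono u _ _ _ _ hu
      intro a
      have hnotdone : u ∉ done := hdisj u List.mem_cons_self
      have hrec : ((done.length : Int)) + 1 + p'.length ≤ pvVisitA d fuel u (done ++ [u]) := by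
        have := ih p' u (done ++ [u]) hu0 hu1 hchain' hnd.of_cons
          (fun v hv => by
            simp only [List.mem_append, List.mem_singleton, not_or]
            exact ⟨hdisj v (List.mem_cons_of_mem _ hv),
              fun h => (List.nodup_cons.mp hnd).1 (h ▸ hv)⟩)
          (by simpa using Nat.le_of_succ_le_succ hlen)
        simp only [List.length_append, List.length_singleton] at this
        omega
      dsimp only
      simp only [hnotdone, if_false, List.length_cons]
      push_cast
      split_ifs with hlt <;> omega

lemma pv_visit_real (d : PySem.Dict Int (List Int)) (n : Int) (g : Int → List Int)
    (hd : ∀ v, 0 ≤ v → v < n → d.getD v [] = g v)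
    (hg : ∀ v u, u ∈ g v → 0 ≤ u ∧ u < n) :
    ∀ (fuel : Nat) (curr : Int) (done : List Int), 0 ≤ curr → curr < n →
      ∃ p : List Int, List.IsChain (fun a b => b ∈ g a) (curr :: p) ∧ p.Nodup ∧
        (∀ v ∈ p, v ∉ done) ∧
        pvVisitA d fuel curr done = ((done.length : Int)) + p.length := by
  intro fuel
  induction fuel with
  | zero =>
    intro curr done _ _
    exact ⟨[], by simp, List.nodup_nil, by simp, by simp [pvVisitA]⟩
  | succ fuel ih =>
    intro curr done hc0 hc1
    show ∃ p, _ ∧ _ ∧ _ ∧ (d.getD curr []).foldl _ _ = _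
    rw [hd curr hc0 hc1]
    have key : ∀ (l : List Int), (∀ e ∈ l, e ∈ g curr) → ∀ (acc : Int),
        (∃ p : List Int, List.IsChain (fun a b => b ∈ g a) (curr :: p) ∧ p.Nodup ∧
          (∀ v ∈ p, v ∉ done) ∧ acc = ((done.length : Int)) + p.length) →
        ∃ p : List Int, List.IsChain (fun a b => b ∈ g a) (curr :: p) ∧ p.Nodup ∧
          (∀ v ∈ p, v ∉ done) ∧
          l.foldl (fun mx elem =>
            if elem ∈ done then mx
            else
              let curr_mx := pvVisitA d fuel elem (done ++ [elem])
              if mx < curr_mx then curr_mx else mx) acc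
          = ((done.length : Int)) + p.length := by
      intro l
      induction l with
      | nil => intro _ acc h; simpa using h
      | cons e l ihl =>
        intro hl acc hacc
        apply ihl (fun x hx => hl x (List.mem_cons_of_mem _ hx))
        by_cases he : e ∈ done
        · simpa [he] using hacc
        · have hemem : e ∈ g curr := hl e List.mem_cons_self
          obtain ⟨he0, he1⟩ := hg curr e hemem
          obtain ⟨q, hqchain, hqnd, hqdisj, hqval⟩ := ih e (done ++ [e]) he0 he1
          simp only [List.length_append, List.length_singleton] at hqval
          by_cases hlt : acc < pvVisitA d fuel e (done ++ [e])
          · refine ⟨e :: q, ?_, ?_, ?_, ?_⟩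
            · exact List.isChain_cons_cons.mpr ⟨hemem, hqchain⟩
            · exact List.nodup_cons.mpr
                ⟨fun h => (hqdisj e h) (by simp), hqnd⟩
            · intro v hv
              rcases List.mem_cons.mp hv with rfl | hv
              · exact he
              · intro hvd
                have hnd := hqdisj v hv
                simp only [List.mem_append, List.mem_singleton, not_or] at hnd
                exact hnd.1 hvd
            · simp only [he, if_false, hqval, List.length_cons]
              push_cast at hlt ⊢
              split_ifs <;> omega
          · obtain ⟨p0, h1, h2, h3, h4⟩ := hacc
            exact ⟨p0, h1, h2, h3, by simp only [he, if_false, hlt, if_false]; exact h4⟩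
    exact key (g curr) (fun e he => he) _ ⟨[], by simp, List.nodup_nil, by simp, by simp⟩

lemma pv_g_range (arr : List String) (n v u : Int) (h : u ∈ pvNeighA arr n v) :
    0 ≤ u ∧ u < n := by
  rw [pv_neigh_eq] at h
  unfold pvAdjB at h
  exact PySem.List.mem_pyRange_one.mp (List.mem_of_mem_filter h)

lemma pv_adj_lookup (arr : List String) (n v : Int) (h0 : 0 ≤ v) (h1 : v < n) :
    PySem.List.pyGetD ((PySem.List.pyRange 0 n 1).map (fun i => pvAdjB arr n i)) v []
    = pvNeighA arr n v := by
  rw [PySem.List.pyGetD_map_pyRange_of_nonneg _ _ _ _ h0 h1, pv_neigh_eq]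

lemma pv_chain_range (arr : List String) (n : Int) :
    ∀ (p : List Int) (s : Int),
      List.IsChain (fun a b => b ∈ pvNeighA arr n a) (s :: p) →
      ∀ v ∈ p, 0 ≤ v ∧ v < n := by
  intro p
  induction p with
  | nil => intro s _ v hv; simp at hv
  | cons u rest ih =>
    intro s hchain v hv
    obtain ⟨hu, hchain'⟩ := List.isChain_cons_cons.mp hchain
    rcases List.mem_cons.mp hv with rfl | hv
    · exact pv_g_range arr n s v hu
    · exact ih u hchain' v hv

def pvValid (g : Int → List Int) (start : Int) (p : List Int) : Prop :=
  ∃ q, p = start :: q ∧ List.IsChain (fun a b => b ∈ g a) (start :: q) ∧ (start :: q).Nodup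

lemma pv_chain_append_iff (R : Int → Int → Prop) (l : List Int) (b : Int) (h : l ≠ []) :
    List.IsChain R (l ++ [b]) ↔ List.IsChain R l ∧ R (l.getLast h) b := by
  rw [List.isChain_append]
  simp [List.getLast?_eq_getLast_of_ne_nil h]

lemma pv_valid_last_range (arr : List String) (n s : Int) (p : List Int)
    (hs0 : 0 ≤ s) (hs1 : s < n)
    (hv : pvValid (fun v => pvNeighA arr n v) s p) (hne : p ≠ []) :
    0 ≤ p.getLast hne ∧ p.getLast hne < n := by
  obtain ⟨q, rfl, hchain, -⟩ := hv
  rcases List.eq_nil_or_concat q with rfl | ⟨r, j, hq⟩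
  · simpa using ⟨hs0, hs1⟩
  · rw [List.concat_eq_append] at hq
    subst hq
    have hlast : (s :: (r ++ [j])).getLast hne = j := by
      simp
    rw [hlast]
    exact pv_chain_range arr n (r ++ [j]) s hchain j (by simp)

lemma pv_valid_len_le (arr : List String) (s : Int) (p : List Int)
    (hs0 : 0 ≤ s) (hs1 : s < (arr.length : Int))
    (hv : pvValid (fun v => pvNeighA arr (arr.length : Int) v) s p) :
    p.length ≤ arr.length := by
  obtain ⟨q, rfl, hchain, hnd⟩ := hv
  have hsub : (s :: q) ⊆ PySem.List.pyRange 0 (arr.length : Int) 1 := by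
    intro v hv
    rcases List.mem_cons.mp hv with rfl | hv
    · exact PySem.List.mem_pyRange_one.mpr ⟨hs0, hs1⟩
    · exact PySem.List.mem_pyRange_one.mpr
        (pv_chain_range arr (arr.length : Int) q s hchain v hv)
  have := (List.subperm_of_subset hnd hsub).length_le
  rw [PySem.List.length_pyRange_one] at this
  omega

lemma pv_valid_prefix (g : Int → List Int) (s : Int) (p : List Int) (m : Nat)
    (hm : 1 ≤ m) (hv : pvValid g s p) : pvValid g s (p.take m) := by
  obtain ⟨q, rfl, hchain, hnd⟩ := hv
  refine ⟨q.take (m-1), ?_, ?_, ?_⟩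
  · rw [show (s :: q).take m = s :: q.take (m-1) by
      cases m with
      | zero => omega
      | succ m => simp]
  · have : s :: q = (s :: q.take (m-1)) ++ q.drop (m-1) := by simp
    rw [this] at hchain
    exact hchain.left_of_append
  · have : s :: q.take (m-1) = (s :: q).take m := by
      cases m with
      | zero => omega
      | succ m => simp
    rw [this]
    exact hnd.sublist (List.take_sublist _ _)

lemma pv_grow_iff (arr : List String) (s L : Int)
    (hs0 : 0 ≤ s) (hs1 : s < (arr.length : Int)) (hL : 1 ≤ L)
    (F : List (List Int))
    (hF : ∀ p, p ∈ F ↔ (pvValid (fun v => pvNeighA arr (arr.length : Int) v) s p ∧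
      (p.length : Int) = L)) (p' : List Int) :
    p' ∈ F.flatMap (fun path =>
      ((PySem.List.pyGetD ((PySem.List.pyRange 0 (arr.length : Int) 1).map
          (fun i => pvAdjB arr (arr.length : Int) i)) (PySem.List.pyGetD path (-1) 0) []).filter
        (fun j => decide (j ∉ path))).map (fun j => path ++ [j]))
    ↔ (pvValid (fun v => pvNeighA arr (arr.length : Int) v) s p' ∧
      (p'.length : Int) = L + 1) := by
  set n : Int := (arr.length : Int) with hn
  simp only [List.mem_flatMap, List.mem_map, List.mem_filter]
  constructor
  · rintro ⟨path, hpath, j, ⟨hj, hjnotin⟩, rfl⟩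
    obtain ⟨⟨q, rfl, hchain, hnd⟩, hlen⟩ := (hF path).mp hpath
    have hne : (s :: q) ≠ [] := List.cons_ne_nil _ _
    rw [PySem.List.pyGetD_neg_one _ _ hne] at hj
    have hlast := pv_valid_last_range arr n s (s :: q) hs0 hs1 ⟨q, rfl, hchain, hnd⟩ hne
    rw [pv_adj_lookup arr n _ hlast.1 hlast.2] at hj
    have hjnotin' : j ∉ s :: q := by simpa using hjnotin
    refine ⟨⟨q ++ [j], by simp, ?_, ?_⟩, ?_⟩
    · rw [show s :: (q ++ [j]) = (s :: q) ++ [j] by simp]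
      exact (pv_chain_append_iff _ _ _ hne).mpr ⟨hchain, hj⟩
    · rw [show s :: (q ++ [j]) = (s :: q) ++ [j] by simp]
      rw [List.nodup_append]
      refine ⟨hnd, List.nodup_singleton j, ?_⟩
      intro a ha b hb
      simp only [List.mem_singleton] at hb
      subst hb
      exact fun h => hjnotin' (h ▸ ha)
    · simp only [List.length_append, List.length_singleton]
      push_cast
      omega
  · rintro ⟨⟨q', rfl, hchain, hnd⟩, hlen⟩
    have hq'ne : q' ≠ [] := by
      intro h
      subst h
      simp at hlen
      omega
    rcases List.eq_nil_or_concat q' with rfl | ⟨r, j, hq⟩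
    · exact absurd rfl hq'ne
    rw [List.concat_eq_append] at hq
    subst hq
    have hsplit : s :: (r ++ [j]) = (s :: r) ++ [j] := by simp
    rw [hsplit] at hchain hnd
    have hne : (s :: r) ≠ [] := List.cons_ne_nil _ _
    obtain ⟨hchain', hj⟩ := (pv_chain_append_iff _ _ _ hne).mp hchain
    rw [List.nodup_append] at hnd
    have hjnotin : j ∉ s :: r := fun hj' => hnd.2.2 j hj' j (by simp) rfl
    have hvalidpath : pvValid (fun v => pvNeighA arr n v) s (s :: r) :=
      ⟨r, rfl, hchain', hnd.1⟩
    have hlast := pv_valid_last_range arr n s (s :: r) hs0 hs1 hvalidpath hne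
    refine ⟨s :: r, (hF (s :: r)).mpr ⟨hvalidpath, ?_⟩, j, ⟨?_, by simpa using hjnotin⟩, hsplit⟩
    · simp only [List.length_cons, List.length_append, List.length_nil] at hlen ⊢
      push_cast at hlen ⊢
      omega
    · rw [PySem.List.pyGetD_neg_one _ _ hne, pv_adj_lookup arr n _ hlast.1 hlast.2]
      exact hj

lemma pv_bfs_eq (arr : List String) (s : Int)
    (hs0 : 0 ≤ s) (hs1 : s < (arr.length : Int)) :
    ∀ (fuel : Nat) (F : List (List Int)) (L : Int), 1 ≤ L →
      (∀ p, p ∈ F ↔ (pvValid (fun v => pvNeighA arr (arr.length : Int) v) s p ∧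
        (p.length : Int) = L)) →
      F ≠ [] → (arr.length : Int) ≤ L + fuel →
      (pvBfs ((PySem.List.pyRange 0 (arr.length : Int) 1).map
          (fun i => pvAdjB arr (arr.length : Int) i)) fuel F L = (arr.length : Int)
        ↔ ∃ p, pvValid (fun v => pvNeighA arr (arr.length : Int) v) s p ∧
            p.length = arr.length) := by
  intro fuel
  induction fuel with
  | zero =>
    intro F L hL hF hFne hfuel
    obtain ⟨p0, hp0⟩ := List.exists_mem_of_ne_nil F hFne
    obtain ⟨hp0v, hp0len⟩ := (hF p0).mp hp0
    have hle := pv_valid_len_le arr s p0 hs0 hs1 hp0v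
    have hLn : L = (arr.length : Int) := by omega
    show (L = (arr.length : Int)) ↔ _
    constructor
    · intro _
      exact ⟨p0, hp0v, by omega⟩
    · intro _
      exact hLn
  | succ fuel ih =>
    intro F L hL hF hFne hfuel
    have hgrow := pv_grow_iff arr s L hs0 hs1 hL F hF
    show (if (F.flatMap _).isEmpty then L else pvBfs _ fuel _ (L + 1)) = _ ↔ _
    by_cases hE : (F.flatMap (fun path =>
      ((PySem.List.pyGetD ((PySem.List.pyRange 0 (arr.length : Int) 1).map
          (fun i => pvAdjB arr (arr.length : Int) i)) (PySem.List.pyGetD path (-1) 0) []).filter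
        (fun j => decide (j ∉ path))).map (fun j => path ++ [j]))).isEmpty
    · rw [if_pos hE]
      obtain ⟨p0, hp0⟩ := List.exists_mem_of_ne_nil F hFne
      obtain ⟨hp0v, hp0len⟩ := (hF p0).mp hp0
      have hle := pv_valid_len_le arr s p0 hs0 hs1 hp0v
      constructor
      · intro hLn
        exact ⟨p0, hp0v, by omega⟩
      · rintro ⟨p, hpv, hplen⟩
        by_contra hLn
        have hLlt : L < (arr.length : Int) := by omega
        have htake : pvValid (fun v => pvNeighA arr (arr.length : Int) v) s
            (p.take (L.toNat + 1)) := pv_valid_prefix _ s p _ (by omega) hpv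
        have htlen : ((p.take (L.toNat + 1)).length : Int) = L + 1 := by
          rw [List.length_take]
          have : L.toNat + 1 ≤ p.length := by omega
          rw [min_eq_left this]
          omega
        have hmem := (hgrow _).mpr ⟨htake, htlen⟩
        rw [List.isEmpty_iff] at hE
        rw [hE] at hmem
        simp at hmem
    · rw [if_neg hE]
      apply ih _ (L + 1) (by omega) hgrow
      · intro h
        rw [h] at hE
        simp at hE
      · omega

lemma pv_visit_iff (arr : List String) (s : Int)
    (hs0 : 0 ≤ s) (hs1 : s < (arr.length : Int)) :
    (pvVisitA ((PySem.List.pyRange 0 (arr.length : Int) 1).foldl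
        (fun d idx => d.insert idx (pvNeighA arr (arr.length : Int) idx)) PySem.Dict.empty)
      arr.length s [s] = (arr.length : Int))
    ↔ ∃ p, pvValid (fun v => pvNeighA arr (arr.length : Int) v) s p ∧
        p.length = arr.length := by
  set n : Int := (arr.length : Int) with hn'
  set g : Int → List Int := fun v => pvNeighA arr n v with hg'
  set d := (PySem.List.pyRange 0 n 1).foldl
    (fun d idx => d.insert idx (g idx)) PySem.Dict.empty with hd'
  have hd : ∀ v, 0 ≤ v → v < n → d.getD v [] = g v := fun v h0 h1 => pv_getD arr n v h0 h1
  have hg : ∀ v u, u ∈ g v → 0 ≤ u ∧ u < n := fun v u h => pv_g_range arr n v u h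
  constructor
  · intro hval
    obtain ⟨p, hchain, hnd, hdisj, hvis⟩ :=
      pv_visit_real d n g hd hg arr.length s [s] hs0 hs1
    rw [hvis] at hval
    simp only [List.length_singleton] at hval
    have hsp : s ∉ p := fun h => by simpa using hdisj s h
    refine ⟨s :: p, ⟨p, rfl, hchain, List.nodup_cons.mpr ⟨hsp, hnd⟩⟩, ?_⟩
    simp only [List.length_cons]
    omega
  · rintro ⟨p, ⟨q, rfl, hchain, hnd⟩, hplen⟩
    have hq : q.length = arr.length - 1 := by
      simp only [List.length_cons] at hplen
      omega
    have hnpos : 1 ≤ arr.length := by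
      have : s < (arr.length : Int) := hs1
      omega
    have hlow := pv_visit_ge d n g hd hg arr.length q s [s] hs0 hs1 hchain
      (List.nodup_cons.mp hnd).2
      (fun v hv => by
        simp only [List.mem_singleton]
        intro h
        exact (List.nodup_cons.mp hnd).1 (h ▸ hv))
      (by omega)
    obtain ⟨r, hrchain, hrnd, hrdisj, hrvis⟩ :=
      pv_visit_real d n g hd hg arr.length s [s] hs0 hs1
    have hsr : s ∉ r := fun h => by simpa using hrdisj s h
    have hrle := pv_valid_len_le arr s (s :: r) hs0 hs1
      ⟨r, rfl, hrchain, List.nodup_cons.mpr ⟨hsr, hrnd⟩⟩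
    simp only [List.length_cons] at hrle
    simp only [List.length_singleton] at hlow hrvis
    rw [hrvis]
    push_cast
    omega

lemma pv_core (arr : List String) (s : Int)
    (hs0 : 0 ≤ s) (hs1 : s < (arr.length : Int)) :
    (pvVisitA ((PySem.List.pyRange 0 (arr.length : Int) 1).foldl
        (fun d idx => d.insert idx (pvNeighA arr (arr.length : Int) idx)) PySem.Dict.empty)
      arr.length s [s] == (arr.length : Int))
    = (pvBfs ((PySem.List.pyRange 0 (arr.length : Int) 1).map
        (fun i => pvAdjB arr (arr.length : Int) i)) arr.length [[s]] 1
      == (arr.length : Int)) := by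
  rw [Bool.eq_iff_iff]
  simp only [beq_iff_eq]
  rw [pv_visit_iff arr s hs0 hs1]
  rw [pv_bfs_eq arr s hs0 hs1 arr.length [[s]] 1 (le_refl 1) ?_ (by simp) (by omega)]
  intro p
  constructor
  · intro hp
    simp only [List.mem_singleton] at hp
    subst hp
    exact ⟨⟨[], rfl, by simp, by simp⟩, by simp⟩
  · rintro ⟨⟨q, rfl, -, -⟩, hlen⟩
    have : q = [] := by
      simp only [List.length_cons] at hlen
      have : q.length = 0 := by omega
      exact List.length_eq_zero_iff.mp this
    subst this
    simp

lemma pv_main (arr : List String) :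
    stringsRearrangement arr = stringsRearrangement_alt arr := by
  simp only [stringsRearrangement, stringsRearrangement_alt]
  rw [pv_values, pv_keys]
  have hadj : (fun i => pvAdjB arr (arr.length : Int) i)
      = fun i => pvNeighA arr (arr.length : Int) i :=
    funext fun i => (pv_neigh_eq arr (arr.length : Int) i).symm
  rw [hadj]
  cases hmin : PySem.List.min? (((PySem.List.pyRange 0 (arr.length : Int) 1).map
      (fun idx => pvNeighA arr (arr.length : Int) idx)).map (fun val => (val.length : Int)))
      (fun x => x) with
  | none => rfl
  | some m =>
    dsimp only
    cases hidx : PySem.List.index? (((PySem.List.pyRange 0 (arr.length : Int) 1).map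
        (fun idx => pvNeighA arr (arr.length : Int) idx)).map (fun val => (val.length : Int))) m with
    | none => rfl
    | some i =>
      dsimp only
      have hibound := PySem.List.getElem_of_index?_eq_some hidx
      obtain ⟨hk, -, -⟩ := hibound
      simp only [List.length_map, PySem.List.length_pyRange_one] at hk
      have hilt : ((i : Nat) : Int) < (arr.length : Int) := by omega
      rw [pv_index_pyRange (arr.length : Int) i hilt]
      dsimp only
      have hcore := pv_core arr ((i : Nat) : Int) (by positivity) hilt
      rw [hadj] at hcore
      exact hcore

-- ===== VERDICT (by name: the statement is the Claim_ definition above) =====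
theorem stringsRearrangement_spec : Claim_equal_stringsRearrangement := by
  intro inputArray _ _
  unfold Spec_stringsRearrangement
  exact pv_main inputArray
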